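-- pv_equiv track=rewrite | github.com/mikedee56/Post-Processing-Shruti | src/utils/conversational_pattern_detector.py | _find_word_position
-- ===== SOURCE A (Python) =====
-- def _find_word_position(text: str, word: str, word_index: int) -> int:
--     """Find the character position of a word in text by word index."""
--     words_seen = 0
--     pos = 0
--
--     while pos < len(text) and words_seen <= word_index:
--         # Skip whitespace
--         while pos < len(text) and text[pos].isspace():
--             pos += 1
--
--         if pos >= len(text):
--             break
--
--         # Found start of a word
--         if words_seen == word_index:
--             return pos
--
--         # Skip to end of current word
--         while pos < len(text) and not text[pos].isspace():
--             pos += 1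
--
--         words_seen += 1
--
--     return pos
-- ===== SOURCE B (Python) =====
-- def _find_word_position(text: str, word: str, word_index: int) -> int:
--     """Find the character position of a word in text by word index."""
--     if word_index < 0:
--         return 0
--     starts = []
--     prev_space = True
--     for i, ch in enumerate(text):
--         if not ch.isspace() and prev_space:
--             starts.append(i)
--         prev_space = ch.isspace()
--     return starts[word_index] if word_index < len(starts) else len(text)
-- ===== Notes on version B (the rewrite author's own statement) =====
-- stated objective: simpler
-- what changed: Replaces the three nested while loops with cursor arithmetic by one flat enumerate pass that records every word-start index in a list, then answers by indexing that list (0 for negative index, len(text) past the last word).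
import Mathlib
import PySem

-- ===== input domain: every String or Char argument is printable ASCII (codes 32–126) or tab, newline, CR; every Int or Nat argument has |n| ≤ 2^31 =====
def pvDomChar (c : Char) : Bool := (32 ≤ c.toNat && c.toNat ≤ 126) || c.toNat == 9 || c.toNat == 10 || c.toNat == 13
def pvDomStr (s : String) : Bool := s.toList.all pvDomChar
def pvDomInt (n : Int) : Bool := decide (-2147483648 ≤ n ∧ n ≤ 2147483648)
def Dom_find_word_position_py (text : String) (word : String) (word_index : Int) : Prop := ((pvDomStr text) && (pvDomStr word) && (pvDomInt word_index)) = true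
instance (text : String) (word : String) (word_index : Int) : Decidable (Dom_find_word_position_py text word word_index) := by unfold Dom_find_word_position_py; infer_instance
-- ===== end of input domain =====

-- B replaces A's three nested cursor loops by one flat pass collecting word-start
-- indices, then indexes that list (objective: simpler).

-- ===== PORT A =====
-- inner `while pos < len(text) and text[pos].isspace(): pos += 1`
def pvSkipSpace (t : List Char) (pos : Nat) : Nat :=
  if pos < t.length then
    if PySem.Chars.isspace (t.getD pos ' ') then pvSkipSpace t (pos + 1) else pos
  else pos
termination_by t.length - pos

-- inner `while pos < len(text) and not text[pos].isspace(): pos += 1`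
def pvSkipWord (t : List Char) (pos : Nat) : Nat :=
  if pos < t.length then
    if ! PySem.Chars.isspace (t.getD pos ' ') then pvSkipWord t (pos + 1) else pos
  else pos
termination_by t.length - pos

-- facts the outer loop's termination needs (cited by decreasing_by)
theorem pvSkipSpace_ge (t : List Char) (pos : Nat) : pos ≤ pvSkipSpace t pos := by
  fun_induction pvSkipSpace t pos with
  | case1 pos h hs ih => omega
  | case2 pos h hs => omega
  | case3 pos h => omega

theorem pvSkipSpace_stop (t : List Char) (pos : Nat) :
    t.length ≤ pvSkipSpace t pos ∨ PySem.Chars.isspace (t.getD (pvSkipSpace t pos) ' ') = false := by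
  fun_induction pvSkipSpace t pos with
  | case1 pos h hs ih => exact ih
  | case2 pos h hs => right; simpa using hs
  | case3 pos h => left; omega

theorem pvSkipWord_ge (t : List Char) (pos : Nat) : pos ≤ pvSkipWord t pos := by
  fun_induction pvSkipWord t pos with
  | case1 pos h hs ih => omega
  | case2 pos h hs => omega
  | case3 pos h => omega

theorem pvSkipWord_gt (t : List Char) (pos : Nat) (h : pos < t.length)
    (hs : PySem.Chars.isspace (t.getD pos ' ') = false) : pos < pvSkipWord t pos := by
  have hge := pvSkipWord_ge t (pos + 1)
  rw [pvSkipWord, if_pos h, hs]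
  simp only [Bool.not_false, if_true]
  omega

-- outer while loop of A
def pvLoopA (t : List Char) (pos : Nat) (seen : Int) (wi : Int) : Nat :=
  if pos < t.length ∧ seen ≤ wi then
    if t.length ≤ pvSkipSpace t pos then pvSkipSpace t pos
    else if seen = wi then pvSkipSpace t pos
    else pvLoopA t (pvSkipWord t (pvSkipSpace t pos)) (seen + 1) wi
  else pos
termination_by t.length - pos
decreasing_by
  rename_i h hlen _
  have h1 := pvSkipSpace_ge t pos
  have h2 := pvSkipSpace_stop t pos
  have h3 : pvSkipSpace t pos < pvSkipWord t (pvSkipSpace t pos) := by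
    apply pvSkipWord_gt t _ (by omega)
    rcases h2 with h2 | h2
    · omega
    · exact h2
  omega

def find_word_position_py (text : String) (word : String) (word_index : Int) : Int :=
  ((pvLoopA text.toList 0 0 word_index : Nat) : Int)

-- ===== PORT B =====
-- the flat `for i, ch in enumerate(text)` pass with the prev_space flag
def pvGo (t : List Char) (i : Nat) (prev : Bool) : List Nat :=
  match t with
  | [] => []
  | c :: cs =>
      (if (! PySem.Chars.isspace c) && prev then [i] else []) ++
        pvGo cs (i + 1) (PySem.Chars.isspace c)

def find_word_position_py_alt (text : String) (word : String) (word_index : Int) : Int :=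
  if word_index < 0 then 0
  else
    let starts := pvGo text.toList 0 true
    if word_index < (starts.length : Int) then ((starts.getD word_index.toNat 0 : Nat) : Int)
    else ((text.toList.length : Nat) : Int)

-- ===== PRECONDITION & SPEC =====
def Spec_find_word_position_py (text : String) (word : String) (word_index : Int) (out : Int) : Prop := out = find_word_position_py_alt text word word_index
instance (text : String) (word : String) (word_index : Int) (out : Int) : Decidable (Spec_find_word_position_py text word word_index out) := by unfold Spec_find_word_position_py; infer_instance

-- ===== CLAIM (what is proved, stated in full; the proofs are below) =====
def Claim_equal_find_word_position_py : Prop := ∀ (text : String) (word : String) (word_index : Int), Dom_find_word_position_py text word word_index → Spec_find_word_position_py text word word_index (find_word_position_py text word word_index)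

-- ===== LEMMAS AND PROOFS =====

theorem pvSkipSpace_le (t : List Char) (pos : Nat) (h : pos ≤ t.length) :
    pvSkipSpace t pos ≤ t.length := by
  fun_induction pvSkipSpace t pos with
  | case1 pos h hs ih => exact ih (by omega)
  | case2 pos h hs => omega
  | case3 pos h => omega

theorem pvSkipWord_le (t : List Char) (pos : Nat) (h : pos ≤ t.length) :
    pvSkipWord t pos ≤ t.length := by
  fun_induction pvSkipWord t pos with
  | case1 pos h hs ih => exact ih (by omega)
  | case2 pos h hs => omega
  | case3 pos h => omega

theorem pvSkipWord_stop (t : List Char) (pos : Nat) :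
    t.length ≤ pvSkipWord t pos ∨ PySem.Chars.isspace (t.getD (pvSkipWord t pos) ' ') = true := by
  fun_induction pvSkipWord t pos with
  | case1 pos h hs ih => exact ih
  | case2 pos h hs => right; simpa using hs
  | case3 pos h => left; omega

-- a cons view of the suffix at an in-range position
theorem pvDrop_cons (t : List Char) (pos : Nat) (h : pos < t.length) :
    t.drop pos = t.getD pos ' ' :: t.drop (pos + 1) := by
  rw [List.getD_eq_getElem t ' ' h]
  exact List.drop_eq_getElem_cons h

-- go over the whitespace A's first inner loop skips
theorem pvGo_skipSpace (t : List Char) (pos : Nat) :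
    pvGo (t.drop pos) pos true = pvGo (t.drop (pvSkipSpace t pos)) (pvSkipSpace t pos) true := by
  fun_induction pvSkipSpace t pos with
  | case1 pos h hs ih =>
      rw [pvDrop_cons t pos h, pvGo, hs]
      simpa using ih
  | case2 pos h hs => rfl
  | case3 pos h => rfl

-- go (prev = false) over the word body A's second inner loop skips
theorem pvGo_skipWord (t : List Char) (pos : Nat) :
    pvGo (t.drop pos) pos false = pvGo (t.drop (pvSkipWord t pos)) (pvSkipWord t pos) false := by
  fun_induction pvSkipWord t pos with
  | case1 pos h hs ih =>
      have hs' : PySem.Chars.isspace (t.getD pos ' ') = false := by simpa using hs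
      rw [pvDrop_cons t pos h, pvGo, hs']
      simpa using ih
  | case2 pos h hs => rfl
  | case3 pos h => rfl

-- at a space (or the end) the prev flag does not matter
theorem pvGo_false_eq_true (t : List Char) (q : Nat)
    (h : t.length ≤ q ∨ PySem.Chars.isspace (t.getD q ' ') = true) :
    pvGo (t.drop q) q false = pvGo (t.drop q) q true := by
  by_cases hq : q < t.length
  · rcases h with h | h
    · omega
    · rw [pvDrop_cons t q hq, pvGo, pvGo, h]
      simp
  · rw [List.drop_eq_nil_of_le (by omega)]
    rfl

-- the outer loop, characterised by the starts list of the remaining suffix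
theorem pvLoopA_eq (t : List Char) (pos : Nat) (seen wi : Int)
    (hpos : pos ≤ t.length) (hsw : seen ≤ wi) :
    (pvLoopA t pos seen wi : Nat) =
      (if wi - seen < ((pvGo (t.drop pos) pos true).length : Int)
       then (pvGo (t.drop pos) pos true).getD (wi - seen).toNat 0
       else t.length) := by
  rw [pvLoopA]
  by_cases hlt : pos < t.length
  · simp only [hlt, hsw, and_self, if_true]
    have hsp_ge := pvSkipSpace_ge t pos
    have hsp_le := pvSkipSpace_le t pos hpos
    rw [pvGo_skipSpace t pos]
    set p := pvSkipSpace t pos with hp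
    by_cases hend : t.length ≤ p
    · have hpl : p = t.length := by omega
      simp only [hend, if_true]
      rw [hpl, List.drop_length]
      simp only [pvGo, List.length_nil]
      rw [if_neg (by omega)]
    · simp only [hend, if_false]
      have hplen : p < t.length := by omega
      have hns : PySem.Chars.isspace (t.getD p ' ') = false := by
        rcases pvSkipSpace_stop t pos with h | h
        · omega
        · exact h
      -- unfold one step of go: head p is a word start
      have hcons : pvGo (t.drop p) p true =
          p :: pvGo (t.drop (pvSkipWord t p)) (pvSkipWord t p) true := by
        rw [pvDrop_cons t p hplen, pvGo, hns]
        simp only [Bool.not_false, Bool.true_and, if_true, List.singleton_append]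
        congr 1
        have hstep : pvSkipWord t p = pvSkipWord t (p + 1) := by
          rw [pvSkipWord, if_pos hplen, hns]
          simp
        rw [hstep, pvGo_skipWord t (p + 1)]
        exact pvGo_false_eq_true t _ (by rw [← hstep]; exact pvSkipWord_stop t p)
      rw [hcons]
      by_cases heq : seen = wi
      · subst heq
        rw [if_pos rfl, if_pos (by simp)]
        simp
      · simp only [heq, if_false]
        have hlt2 : seen + 1 ≤ wi := by omega
        have hwge := pvSkipWord_ge t p
        have hwle := pvSkipWord_le t p (by omega)
        rw [pvLoopA_eq t (pvSkipWord t p) (seen + 1) wi hwle hlt2]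
        simp only [List.length_cons]
        have h1 : (1 : Int) ≤ wi - seen := by omega
        by_cases hin : wi - (seen + 1) < ((pvGo (t.drop (pvSkipWord t p)) (pvSkipWord t p) true).length : Int)
        · rw [if_pos hin, if_pos (by push_cast; omega)]
          have : (wi - seen).toNat = (wi - (seen + 1)).toNat + 1 := by omega
          rw [this]
          simp
        · rw [if_neg hin, if_neg (by push_cast; omega)]
  · simp only [hlt, false_and, if_false]
    have hpl : pos = t.length := by omega
    rw [hpl, List.drop_length]
    simp only [pvGo, List.length_nil]
    rw [if_neg (by omega)]
termination_by t.length - pos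
decreasing_by
  have := pvSkipSpace_ge t pos
  have : pvSkipSpace t pos < pvSkipWord t (pvSkipSpace t pos) :=
    pvSkipWord_gt t _ (by omega) hns
  omega

-- ===== VERDICT (by name: the statement is the Claim_ definition above) =====
theorem find_word_position_py_spec : Claim_equal_find_word_position_py := by
  intro text word wi _
  unfold Spec_find_word_position_py find_word_position_py find_word_position_py_alt
  by_cases hneg : wi < 0
  · rw [if_pos hneg, pvLoopA]
    rw [if_neg (by omega)]
    rfl
  · rw [if_neg hneg]
    have h := pvLoopA_eq text.toList 0 0 wi (by omega) (by omega)
    simp only [List.drop_zero, sub_zero] at h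
    rw [h, apply_ite (fun n : Nat => (n : Int))]
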